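-- pv_equiv track=rewrite | github.com/RyanRossEdwards/CS320 | A5/a5.py | maxSum2
-- ===== SOURCE A (Python) =====
-- def maxSum2(array, dp1, dp2):
--
--     dp1i_start = 2
--     dp2i_start = 3
--
--     dp1i_end = len(array)-1
--     dp2i_end = len(array)
--
--     dp1j_start = 0
--     dp2j_start = 1
--
--     # dp1 and dp2 both end at i-1
--
--     for i in range(2, len(array)):
--
--         for j in range(0, i-1):
--
--             if dp1[i] < dp1[j] + array[i] and i >= dp1i_start and i < dp1i_end and j >= dp1j_start:
--                 dp1[i] = dp1[j] + array[i]
--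
--             if dp2[i] < dp2[j] + array[i] and i >= dp2i_start and i < dp2i_end and j >= dp2j_start:
--                 dp2[i] = dp2[j] + array[i]
--
--     return max(max(dp1), max(dp2))
-- ===== SOURCE B (Python) =====
-- # B: single pass with running prefix maxima (O(n)) instead of A's quadratic inner scan.
-- # Return-value equivalence only: A mutates dp1/dp2 in place, B leaves them untouched.
-- def maxSum2(array, dp1, dp2):
--     n = len(array)
--     f1 = list(dp1)
--     f2 = list(dp2)
--     m1 = None  # max of f1[0..i-2]
--     m2 = None  # max of f2[1..i-2]
--     for i in range(2, n):
--         m1 = f1[i - 2] if m1 is None else max(m1, f1[i - 2])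
--         if i < n - 1:
--             f1[i] = max(f1[i], m1 + array[i])
--         if i >= 3:
--             m2 = f2[i - 2] if m2 is None else max(m2, f2[i - 2])
--             f2[i] = max(f2[i], m2 + array[i])
--     return max(max(f1), max(f2))
-- ===== Notes on version B (the rewrite author's own statement) =====
-- stated objective: faster
-- what changed: Replaces the quadratic inner scan over all earlier indices with running prefix maxima of the dp values, turning the nested loops into a single pass.
import Mathlib
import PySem

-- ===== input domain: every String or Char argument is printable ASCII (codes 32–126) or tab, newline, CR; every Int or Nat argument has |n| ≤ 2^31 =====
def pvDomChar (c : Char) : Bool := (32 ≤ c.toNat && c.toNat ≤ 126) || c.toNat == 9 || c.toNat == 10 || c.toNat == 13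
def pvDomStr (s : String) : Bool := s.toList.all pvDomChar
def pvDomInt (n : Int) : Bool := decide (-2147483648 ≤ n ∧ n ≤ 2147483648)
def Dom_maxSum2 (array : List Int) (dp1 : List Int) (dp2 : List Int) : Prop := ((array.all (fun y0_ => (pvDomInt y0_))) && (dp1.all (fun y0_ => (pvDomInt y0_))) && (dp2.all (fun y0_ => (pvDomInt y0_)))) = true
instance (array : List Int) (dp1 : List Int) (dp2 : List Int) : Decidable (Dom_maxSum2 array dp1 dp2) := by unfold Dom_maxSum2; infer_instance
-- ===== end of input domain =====

-- B replaces A's quadratic inner scan by running prefix maxima (one pass); return-value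
-- equivalence only: A mutates dp1/dp2 in place, B does not.

-- ===== PORT A =====
-- A's inner 'for j' loop.  dp1 and dp2 are distinct lists, so the two sequential in-place
-- updates of one Python iteration are exactly the paired update below.  Indexing is via
-- pyGetD/pySetD with default 0: Pre_maxSum2 excludes every input where Python would raise.
def stepA1 (array : List Int) (n i : Int) (d : List Int) (j : Int) : List Int :=
  if PySem.List.pyGetD d i 0 < PySem.List.pyGetD d j 0 + PySem.List.pyGetD array i 0
     ∧ 2 ≤ i ∧ i < n - 1 ∧ 0 ≤ j
  then PySem.List.pySetD d i (PySem.List.pyGetD d j 0 + PySem.List.pyGetD array i 0) else d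

def stepA2 (array : List Int) (n i : Int) (d : List Int) (j : Int) : List Int :=
  if PySem.List.pyGetD d i 0 < PySem.List.pyGetD d j 0 + PySem.List.pyGetD array i 0
     ∧ 3 ≤ i ∧ i < n ∧ 1 ≤ j
  then PySem.List.pySetD d i (PySem.List.pyGetD d j 0 + PySem.List.pyGetD array i 0) else d

def innerA (array : List Int) (n i : Int) (p : List Int × List Int) : List Int × List Int :=
  (PySem.List.pyRange 0 (i - 1) 1).foldl (fun p j =>
    (stepA1 array n i p.1 j, stepA2 array n i p.2 j)) p

def maxSum2 (array : List Int) (dp1 : List Int) (dp2 : List Int) : Int :=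
  let n := PySem.List.len array
  let p := (PySem.List.pyRange 2 n 1).foldl (fun p i => innerA array n i p) (dp1, dp2)
  max ((PySem.List.max? p.1 (fun x => x)).getD 0) ((PySem.List.max? p.2 (fun x => x)).getD 0)

-- ===== PORT B =====
-- one pass: state (f1, f2, m1, m2); m1/m2 are the running prefix maxima (None until first set).
-- 'm1 + array[i]' in Source B runs where m1 is never None; '.getD 0' is that (unreachable-default) read.
-- 'x if m is None else max(m, x)' from Source B
def optIns (m : Option Int) (x : Int) : Int :=
  match m with
  | none => x
  | some v => max v x

def stepB (array : List Int) (n : Int) (st : List Int × List Int × Option Int × Option Int)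
    (i : Int) : List Int × List Int × Option Int × Option Int :=
  let f1 := st.1
  let f2 := st.2.1
  let m1 : Int := optIns st.2.2.1 (PySem.List.pyGetD f1 (i - 2) 0)
  let f1' := if i < n - 1 then
      PySem.List.pySetD f1 i (max (PySem.List.pyGetD f1 i 0) (m1 + PySem.List.pyGetD array i 0))
    else f1
  if 3 ≤ i then
    let m2 : Int := optIns st.2.2.2 (PySem.List.pyGetD f2 (i - 2) 0)
    let f2' := PySem.List.pySetD f2 i (max (PySem.List.pyGetD f2 i 0) (m2 + PySem.List.pyGetD array i 0))
    (f1', f2', some m1, some m2)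
  else (f1', f2, some m1, st.2.2.2)

def maxSum2_alt (array : List Int) (dp1 : List Int) (dp2 : List Int) : Int :=
  let n := PySem.List.len array
  let st := (PySem.List.pyRange 2 n 1).foldl (stepB array n)
      (dp1, dp2, (none : Option Int), (none : Option Int))
  max ((PySem.List.max? st.1 (fun x => x)).getD 0) ((PySem.List.max? st.2.1 (fun x => x)).getD 0)

-- ===== PRECONDITION & SPEC =====
-- Exactly the inputs on which A returns: max() needs dp1,dp2 nonempty, and when the loops run
-- (len(array) ≥ 3) every dp index 2..len(array)-1 must exist, i.e. len(dp) ≥ len(array).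
def Pre_maxSum2 (array : List Int) (dp1 : List Int) (dp2 : List Int) : Prop :=
  dp1 ≠ [] ∧ dp2 ≠ [] ∧
    (3 ≤ array.length → array.length ≤ dp1.length ∧ array.length ≤ dp2.length)
instance (array : List Int) (dp1 : List Int) (dp2 : List Int) : Decidable (Pre_maxSum2 array dp1 dp2) := by unfold Pre_maxSum2; infer_instance

def pvWitness_maxSum2 : List Int × List Int × List Int :=
  ([3, -1, 4, 1, -5], [3, -1, 0, 0, 0], [0, -1, 4, 0, 0])

def Spec_maxSum2 (array : List Int) (dp1 : List Int) (dp2 : List Int) (out : Int) : Prop := out = maxSum2_alt array dp1 dp2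
instance (array : List Int) (dp1 : List Int) (dp2 : List Int) (out : Int) : Decidable (Spec_maxSum2 array dp1 dp2 out) := by unfold Spec_maxSum2; infer_instance

-- ===== CLAIM (what is proved, stated in full; the proofs are below) =====
def Claim_equal_maxSum2 : Prop := ∀ (array : List Int) (dp1 : List Int) (dp2 : List Int), Dom_maxSum2 array dp1 dp2 → Pre_maxSum2 array dp1 dp2 → Spec_maxSum2 array dp1 dp2 (maxSum2 array dp1 dp2)

-- ===== LEMMAS AND PROOFS =====

-- max of a nonempty list, as the running-max loop leaves it ([] ↦ 0, never used on []).
def pmv : List Int → Int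
  | [] => 0
  | h :: t => t.foldl max h

theorem pmv_snoc (l : List Int) (hl : l ≠ []) (x : Int) : pmv (l ++ [x]) = max (pmv l) x := by
  cases l with
  | nil => exact absurd rfl hl
  | cons h t => simp [pmv, List.foldl_append]

-- a pair-state fold whose components do not interact splits into two folds
theorem foldl_prod_split {α β γ : Type} (F : α → γ → α) (G : β → γ → β) :
    ∀ (L : List γ) (x : α) (y : β),
      L.foldl (fun p j => (F p.1 j, G p.2 j)) (x, y) = (L.foldl F x, L.foldl G y) := by
  intro L
  induction L with
  | nil => intro x y; rfl
  | cons a t ih => intro x y; simpa using ih (F x a) (G y a)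

-- the values read at indices 0..m-1 are the prefix take m
theorem prefMap (d : List Int) : ∀ (m : Nat), m ≤ d.length →
    (PySem.List.pyRange 0 (m : Int) 1).map (fun j => PySem.List.pyGetD d j 0) = d.take m := by
  intro m
  induction m with
  | zero => intro _; simp [PySem.List.pyRange_one_eq_nil]
  | succ m ih =>
    intro hm
    have hcast : ((m + 1 : Nat) : Int) = (m : Int) + 1 := by push_cast; ring
    rw [hcast, PySem.List.pyRange_one_succ_right (by positivity), List.map_append,
      ih (by omega)]
    have hlt : m < d.length := by omega
    have htake : d.take (m + 1) = d.take m ++ [d[m]] := by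
      rw [List.take_add_one]; simp [List.getElem?_eq_getElem hlt]
    rw [htake]
    congr 1
    simp only [List.map_cons, List.map_nil]
    rw [PySem.List.pyGetD_natCast, List.getD_eq_getElem d 0 hlt]

theorem prefMap1 (d : List Int) (m : Nat) (h1 : 1 ≤ m) (hm : m ≤ d.length) :
    (PySem.List.pyRange 1 (m : Int) 1).map (fun j => PySem.List.pyGetD d j 0)
      = (d.take m).drop 1 := by
  have h := prefMap d m hm
  rw [PySem.List.pyRange_one_cons (by exact_mod_cast h1)] at h
  norm_num at h
  rw [← h]
  simp

-- running max over values shifted by a constant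
theorem foldl_max_map_add (a : Int) :
    ∀ (l : List Int) (v0 c : Int),
      ((l.map (fun x => x + a)).foldl max (max v0 (c + a))) = max v0 ((l.foldl max c) + a) := by
  intro l
  induction l with
  | nil => intro v0 c; rfl
  | cons x t ih =>
    intro v0 c
    have h1 : max (max v0 (c + a)) (x + a) = max v0 ((max c x) + a) := by
      rw [max_assoc]
      congr 1
      omega
    simp only [List.map_cons, List.foldl_cons, h1, ih]

theorem fold_max_prefix (d : List Int) (m : Nat) (h1 : 1 ≤ m) (hm : m ≤ d.length) (a v0 : Int) :
    (PySem.List.pyRange 0 (m : Int) 1).foldl (fun v j => max v (PySem.List.pyGetD d j 0 + a)) v0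
      = max v0 (pmv (d.take m) + a) := by
  have hmap := prefMap d m hm
  have hfold : (PySem.List.pyRange 0 (m : Int) 1).foldl
      (fun v j => max v (PySem.List.pyGetD d j 0 + a)) v0
      = (((PySem.List.pyRange 0 (m : Int) 1).map (fun j => PySem.List.pyGetD d j 0)).map
          (fun x => x + a)).foldl max v0 := by
    rw [List.foldl_map, List.foldl_map]
  rw [hfold, hmap]
  obtain ⟨h, t, ht⟩ : ∃ h t, d.take m = h :: t := by
    have : d.take m ≠ [] := by
      have : (d.take m).length = m := by simp [List.length_take]; omega
      intro hnil; rw [hnil] at this; simp at this; omega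
    cases hd : d.take m with
    | nil => exact absurd hd this
    | cons h t => exact ⟨h, t, rfl⟩
  rw [ht]
  have : max v0 (h + a) = max v0 (h + a) := rfl
  simp only [List.map_cons, List.foldl_cons, pmv]
  rw [← foldl_max_map_add a t v0 h]

theorem fold_max_prefix1 (d : List Int) (m : Nat) (h2 : 2 ≤ m) (hm : m ≤ d.length) (a v0 : Int) :
    (PySem.List.pyRange 1 (m : Int) 1).foldl (fun v j => max v (PySem.List.pyGetD d j 0 + a)) v0
      = max v0 (pmv ((d.take m).drop 1) + a) := by
  have hmap := prefMap1 d m (by omega) hm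
  have hfold : (PySem.List.pyRange 1 (m : Int) 1).foldl
      (fun v j => max v (PySem.List.pyGetD d j 0 + a)) v0
      = (((PySem.List.pyRange 1 (m : Int) 1).map (fun j => PySem.List.pyGetD d j 0)).map
          (fun x => x + a)).foldl max v0 := by
    rw [List.foldl_map, List.foldl_map]
  rw [hfold, hmap]
  obtain ⟨h, t, ht⟩ : ∃ h t, (d.take m).drop 1 = h :: t := by
    have hlen : ((d.take m).drop 1).length = m - 1 := by
      simp [List.length_take]; omega
    cases hd : (d.take m).drop 1 with
    | nil => rw [hd] at hlen; simp at hlen; omega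
    | cons h t => exact ⟨h, t, rfl⟩
  rw [ht]
  simp only [List.map_cons, List.foldl_cons, pmv]
  rw [← foldl_max_map_add a t v0 h]

-- core of A's inner loop on ONE list: repeated conditional overwrite of index i is
-- a single overwrite with the running max
theorem inner_fold_set (d : List Int) (iN : Nat) (hi : iN < d.length) (a : Int) :
    ∀ (L : List Int), (∀ j ∈ L, 0 ≤ j ∧ j < (iN : Int)) → ∀ (v : Int),
      L.foldl (fun d' j =>
          if PySem.List.pyGetD d' (iN : Int) 0 < PySem.List.pyGetD d' j 0 + a
          then PySem.List.pySetD d' (iN : Int) (PySem.List.pyGetD d' j 0 + a) else d')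
        (d.set iN v)
      = d.set iN (L.foldl (fun v j => max v (PySem.List.pyGetD d j 0 + a)) v) := by
  intro L
  induction L with
  | nil => intro _ v; rfl
  | cons j t ih =>
    intro hmem v
    obtain ⟨hj0, hji⟩ := hmem j (List.mem_cons_self)
    set jN := j.toNat with hjN
    have hjcast : j = (jN : Int) := by omega
    have hjlt : jN < iN := by omega
    have hjd : jN < d.length := by omega
    have hget_i : PySem.List.pyGetD (d.set iN v) (iN : Int) 0 = v := by
      rw [PySem.List.pyGetD_natCast]
      rw [List.getD_eq_getElem _ 0 (by simpa using hi)]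
      simp [List.getElem_set_self]
    have hget_j : PySem.List.pyGetD (d.set iN v) j 0 = PySem.List.pyGetD d j 0 := by
      rw [hjcast, PySem.List.pyGetD_natCast, PySem.List.pyGetD_natCast]
      rw [List.getD_eq_getElem _ 0 (by simpa using hjd), List.getD_eq_getElem _ 0 hjd]
      simp [List.getElem_set_ne (by omega : iN ≠ jN)]
    have hset : ∀ w, PySem.List.pySetD (d.set iN v) (iN : Int) w = d.set iN w := by
      intro w
      rw [PySem.List.pySetD_natCast, List.set_set]
    simp only [List.foldl_cons, hget_i, hget_j, hset]
    have hmax : (if v < PySem.List.pyGetD d j 0 + a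
        then d.set iN (PySem.List.pyGetD d j 0 + a) else d.set iN v)
        = d.set iN (max v (PySem.List.pyGetD d j 0 + a)) := by
      split <;> congr 1 <;> omega
    rw [hmax]
    exact ih (fun x hx => hmem x (List.mem_cons_of_mem _ hx)) _

-- characterisation of one full iteration of A's outer loop
theorem innerA_eq (array : List Int) (N : Int) (k : Nat) (d1 d2 : List Int)
    (hN : ((2 + k : Nat) : Int) < N)
    (h1 : 2 + k < d1.length) (h2 : 2 + k < d2.length) :
    innerA array N (((2 + k : Nat) : Int)) (d1, d2) =
      ((if ((2 + k : Nat) : Int) < N - 1 then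
          d1.set (2 + k) (max (d1.getD (2 + k) 0)
            (pmv (d1.take (k + 1)) + array.getD (2 + k) 0)) else d1),
       (if 1 ≤ k then
          d2.set (2 + k) (max (d2.getD (2 + k) 0)
            (pmv ((d2.take (k + 1)).drop 1) + array.getD (2 + k) 0)) else d2)) := by
  have hi2 : (2 : Int) ≤ ((2 + k : Nat) : Int) := by push_cast; omega
  have hrange : ∀ j ∈ PySem.List.pyRange 0 (((2 + k : Nat) : Int) - 1) 1,
      0 ≤ j ∧ j < ((2 + k : Nat) : Int) := by
    intro j hj
    rw [PySem.List.mem_pyRange_one] at hj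
    omega
  have hm1 : ((2 + k : Nat) : Int) - 1 = ((k + 1 : Nat) : Int) := by push_cast; ring
  unfold innerA
  rw [foldl_prod_split (stepA1 array N ((2 + k : Nat) : Int)) (stepA2 array N ((2 + k : Nat) : Int))]
  refine Prod.ext ?_ ?_ <;> dsimp only
  · -- dp1 component
    by_cases hlt : ((2 + k : Nat) : Int) < N - 1
    · rw [if_pos hlt]
      have hcong : ∀ (d : List Int) (j : Int), j ∈ PySem.List.pyRange 0 (((2 + k : Nat) : Int) - 1) 1 →
          stepA1 array N ((2 + k : Nat) : Int) d j =
          (fun d' j => if PySem.List.pyGetD d' ((2 + k : Nat) : Int) 0 <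
              PySem.List.pyGetD d' j 0 + PySem.List.pyGetD array ((2 + k : Nat) : Int) 0
            then PySem.List.pySetD d' ((2 + k : Nat) : Int)
              (PySem.List.pyGetD d' j 0 + PySem.List.pyGetD array ((2 + k : Nat) : Int) 0)
            else d') d j := by
        intro d j hj
        obtain ⟨hj0, _⟩ := hrange j hj
        simp only [stepA1]
        exact if_congr (and_iff_left ⟨hi2, hlt, hj0⟩) rfl rfl
      rw [PySem.List.foldl_congr_mem _ _ _ _ hcong]
      have hcore := inner_fold_set d1 (2 + k) h1
        (PySem.List.pyGetD array ((2 + k : Nat) : Int) 0)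
        (PySem.List.pyRange 0 (((2 + k : Nat) : Int) - 1) 1) hrange d1[2 + k]
      rw [List.set_getElem_self] at hcore
      rw [hcore, hm1, fold_max_prefix d1 (k + 1) (by omega) (by omega)]
      rw [List.getD_eq_getElem d1 0 h1, PySem.List.pyGetD_natCast array]
    · rw [if_neg hlt]
      have hcong : ∀ (d : List Int) (j : Int), j ∈ PySem.List.pyRange 0 (((2 + k : Nat) : Int) - 1) 1 →
          stepA1 array N ((2 + k : Nat) : Int) d j = (fun (d' : List Int) (_ : Int) => d') d j := by
        intro d j _
        simp only [stepA1]
        rw [if_neg]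
        intro hc
        exact hlt hc.2.2.1
      rw [PySem.List.foldl_congr_mem _ _ _ _ hcong, PySem.List.foldl_ignore]
  · -- dp2 component
    by_cases hk1 : 1 ≤ k
    · rw [if_pos hk1]
      have hi3 : (3 : Int) ≤ ((2 + k : Nat) : Int) := by push_cast; omega
      rw [PySem.List.pyRange_one_cons (by push_cast; omega)]
      rw [List.foldl_cons]
      have hj0 : stepA2 array N ((2 + k : Nat) : Int) d2 0 = d2 := by
        simp only [stepA2]
        rw [if_neg]
        intro hc
        omega
      rw [hj0]
      have hrange1 : ∀ j ∈ PySem.List.pyRange (0 + 1) (((2 + k : Nat) : Int) - 1) 1,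
          0 ≤ j ∧ j < ((2 + k : Nat) : Int) := by
        intro j hj
        rw [PySem.List.mem_pyRange_one] at hj
        omega
      have hcong : ∀ (d : List Int) (j : Int),
          j ∈ PySem.List.pyRange (0 + 1) (((2 + k : Nat) : Int) - 1) 1 →
          stepA2 array N ((2 + k : Nat) : Int) d j =
          (fun d' j => if PySem.List.pyGetD d' ((2 + k : Nat) : Int) 0 <
              PySem.List.pyGetD d' j 0 + PySem.List.pyGetD array ((2 + k : Nat) : Int) 0
            then PySem.List.pySetD d' ((2 + k : Nat) : Int)
              (PySem.List.pyGetD d' j 0 + PySem.List.pyGetD array ((2 + k : Nat) : Int) 0)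
            else d') d j := by
        intro d j hj
        rw [PySem.List.mem_pyRange_one] at hj
        simp only [stepA2]
        exact if_congr (and_iff_left ⟨hi3, hN, by omega⟩) rfl rfl
      rw [PySem.List.foldl_congr_mem _ _ _ _ hcong]
      have hcore := inner_fold_set d2 (2 + k) h2
        (PySem.List.pyGetD array ((2 + k : Nat) : Int) 0)
        (PySem.List.pyRange (0 + 1) (((2 + k : Nat) : Int) - 1) 1) hrange1 d2[2 + k]
      rw [List.set_getElem_self] at hcore
      rw [hcore]
      have h0 : (0 : Int) + 1 = 1 := by ring
      rw [h0, hm1, fold_max_prefix1 d2 (k + 1) (by omega) (by omega)]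
      rw [List.getD_eq_getElem d2 0 h2, PySem.List.pyGetD_natCast array]
    · rw [if_neg hk1]
      have hcong : ∀ (d : List Int) (j : Int), j ∈ PySem.List.pyRange 0 (((2 + k : Nat) : Int) - 1) 1 →
          stepA2 array N ((2 + k : Nat) : Int) d j = (fun (d' : List Int) (_ : Int) => d') d j := by
        intro d j _
        simp only [stepA2]
        rw [if_neg]
        intro hc
        have : (3 : Int) ≤ ((2 + k : Nat) : Int) := hc.2.1
        push_cast at this
        omega
      rw [PySem.List.foldl_congr_mem _ _ _ _ hcong, PySem.List.foldl_ignore]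

-- A-side and B-side partial runs of the outer loop, up to bound t
def aFold (array dp1 dp2 : List Int) (t : Int) : List Int × List Int :=
  (PySem.List.pyRange 2 t 1).foldl (fun p i => innerA array (PySem.List.len array) i p) (dp1, dp2)

def bFold (array dp1 dp2 : List Int) (t : Int) : List Int × List Int × Option Int × Option Int :=
  (PySem.List.pyRange 2 t 1).foldl (stepB array (PySem.List.len array))
    (dp1, dp2, (none : Option Int), (none : Option Int))

theorem pmv_take_succ (f : List Int) (k : Nat) (hk : k < f.length) :
    pmv (f.take (k + 1)) = (if k = 0 then f.getD k 0 else max (pmv (f.take k)) (f.getD k 0)) := by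
  have htake : f.take (k + 1) = f.take k ++ [f[k]] := by
    rw [List.take_add_one]; simp [List.getElem?_eq_getElem hk]
  rw [htake, List.getD_eq_getElem f 0 hk]
  by_cases h0 : k = 0
  · subst h0; simp [pmv]
  · rw [if_neg h0, pmv_snoc]
    intro hnil
    have := congrArg List.length hnil
    rw [List.length_take] at this
    simp only [List.length_nil] at this
    omega

theorem pmv_drop1_take_succ (f : List Int) (k : Nat) (hk : k < f.length) (hk1 : 1 ≤ k) :
    pmv ((f.take (k + 1)).drop 1)
      = (if k = 1 then f.getD k 0 else max (pmv ((f.take k).drop 1)) (f.getD k 0)) := by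
  have htake : f.take (k + 1) = f.take k ++ [f[k]] := by
    rw [List.take_add_one]; simp [List.getElem?_eq_getElem hk]
  have hlen : 1 ≤ (f.take k).length := by simp [List.length_take]; omega
  have hdrop : (f.take (k + 1)).drop 1 = (f.take k).drop 1 ++ [f[k]] := by
    rw [htake, List.drop_append_of_le_length hlen]
  rw [hdrop, List.getD_eq_getElem f 0 hk]
  by_cases h1 : k = 1
  · subst h1
    have : (f.take 1).drop 1 = [] := by
      apply List.drop_eq_nil_of_le
      simp
    simp [this, pmv]
  · rw [if_neg h1, pmv_snoc]
    intro hnil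
    have := congrArg List.length hnil
    rw [List.length_drop, List.length_take] at this
    simp only [List.length_nil] at this
    omega

-- characterisation of one iteration of B's loop
theorem stepB_eq (array : List Int) (N : Int) (k : Nat) (f1 f2 : List Int) (m1 m2 : Option Int)
    (h1 : 2 + k < f1.length) (h2 : 2 + k < f2.length)
    (hm1 : m1 = (if k = 0 then none else some (pmv (f1.take k))))
    (hm2 : m2 = (if k ≤ 1 then none else some (pmv ((f2.take k).drop 1)))) :
    stepB array N (f1, f2, m1, m2) ((2 + k : Nat) : Int) =
      ((if ((2 + k : Nat) : Int) < N - 1 then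
          f1.set (2 + k) (max (f1.getD (2 + k) 0)
            (pmv (f1.take (k + 1)) + array.getD (2 + k) 0)) else f1),
       (if 1 ≤ k then
          f2.set (2 + k) (max (f2.getD (2 + k) 0)
            (pmv ((f2.take (k + 1)).drop 1) + array.getD (2 + k) 0)) else f2),
       some (pmv (f1.take (k + 1))),
       (if k = 0 then none else some (pmv ((f2.take (k + 1)).drop 1)))) := by
  subst hm1 hm2
  have hsub2 : (((2 + k : Nat) : Int) - 2) = ((k : Nat) : Int) := by push_cast; ring
  unfold stepB
  dsimp only
  have hm1' : optIns (if k = 0 then none else some (pmv (f1.take k)))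
      (PySem.List.pyGetD f1 (((2 + k : Nat) : Int) - 2) 0) = pmv (f1.take (k + 1)) := by
    rw [hsub2, PySem.List.pyGetD_natCast, pmv_take_succ f1 k (by omega)]
    by_cases h0 : k = 0 <;> simp [h0, optIns]
  rw [hm1']
  by_cases hk1 : 1 ≤ k
  · rw [if_pos (show (3 : Int) ≤ ((2 + k : Nat) : Int) by push_cast; omega), if_pos hk1]
    have hm2' : optIns (if k ≤ 1 then none else some (pmv ((f2.take k).drop 1)))
        (PySem.List.pyGetD f2 (((2 + k : Nat) : Int) - 2) 0)
        = pmv ((f2.take (k + 1)).drop 1) := by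
      rw [hsub2, PySem.List.pyGetD_natCast, pmv_drop1_take_succ f2 k (by omega) hk1]
      by_cases h1' : k = 1 <;> simp [h1', show k ≤ 1 ↔ k = 1 by omega, optIns]
    rw [hm2']
    rw [if_neg (show ¬ k = 0 by omega)]
    simp only [PySem.List.pySetD_natCast, PySem.List.pyGetD_natCast]
  · rw [if_neg (show ¬ (3 : Int) ≤ ((2 + k : Nat) : Int) by push_cast; omega), if_neg hk1]
    have hk0 : k = 0 := by omega
    subst hk0
    rw [if_pos rfl]
    simp only [PySem.List.pySetD_natCast, PySem.List.pyGetD_natCast]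
    norm_num

-- the main invariant: after processing i = 2 .. 2+k-1 the two states agree and
-- B's accumulators are the prefix maxima of the current dp lists
theorem mainInv (array dp1 dp2 : List Int)
    (hd1 : array.length ≤ dp1.length) (hd2 : array.length ≤ dp2.length) :
    ∀ (k : Nat), 2 + k ≤ array.length →
      (aFold array dp1 dp2 ((2 + k : Nat) : Int)).1 = (bFold array dp1 dp2 ((2 + k : Nat) : Int)).1 ∧
      (aFold array dp1 dp2 ((2 + k : Nat) : Int)).2 = (bFold array dp1 dp2 ((2 + k : Nat) : Int)).2.1 ∧
      (bFold array dp1 dp2 ((2 + k : Nat) : Int)).1.length = dp1.length ∧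
      (bFold array dp1 dp2 ((2 + k : Nat) : Int)).2.1.length = dp2.length ∧
      (bFold array dp1 dp2 ((2 + k : Nat) : Int)).2.2.1
        = (if k = 0 then none
           else some (pmv ((bFold array dp1 dp2 ((2 + k : Nat) : Int)).1.take k))) ∧
      (bFold array dp1 dp2 ((2 + k : Nat) : Int)).2.2.2
        = (if k ≤ 1 then none
           else some (pmv (((bFold array dp1 dp2 ((2 + k : Nat) : Int)).2.1.take k).drop 1))) := by
  intro k
  induction k with
  | zero =>
    intro _
    have hnil : PySem.List.pyRange 2 ((2 + 0 : Nat) : Int) 1 = [] :=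
      PySem.List.pyRange_one_eq_nil (by norm_num)
    unfold aFold bFold
    rw [hnil]
    simp
  | succ k ih =>
    intro hk
    obtain ⟨hP1, hP2, hL1, hL2, hM1, hM2⟩ := ih (by omega)
    have hcast : ((2 + (k + 1) : Nat) : Int) = ((2 + k : Nat) : Int) + 1 := by push_cast; ring
    have hstep : (2 : Int) ≤ ((2 + k : Nat) : Int) := by push_cast; omega
    have hsplit : PySem.List.pyRange 2 ((2 + (k + 1) : Nat) : Int) 1
        = PySem.List.pyRange 2 ((2 + k : Nat) : Int) 1 ++ [((2 + k : Nat) : Int)] := by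
      rw [hcast, PySem.List.pyRange_one_succ_right hstep]
    have hsplitA : aFold array dp1 dp2 ((2 + (k + 1) : Nat) : Int)
        = innerA array (PySem.List.len array) ((2 + k : Nat) : Int)
            (aFold array dp1 dp2 ((2 + k : Nat) : Int)) := by
      unfold aFold
      rw [hsplit, List.foldl_append]
      rfl
    have hsplitB : bFold array dp1 dp2 ((2 + (k + 1) : Nat) : Int)
        = stepB array (PySem.List.len array)
            (bFold array dp1 dp2 ((2 + k : Nat) : Int)) ((2 + k : Nat) : Int) := by
      unfold bFold
      rw [hsplit, List.foldl_append]
      rfl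
    have hA' : aFold array dp1 dp2 ((2 + k : Nat) : Int)
        = ((bFold array dp1 dp2 ((2 + k : Nat) : Int)).1,
           (bFold array dp1 dp2 ((2 + k : Nat) : Int)).2.1) := Prod.ext hP1 hP2
    have hB' : bFold array dp1 dp2 ((2 + k : Nat) : Int)
        = ((bFold array dp1 dp2 ((2 + k : Nat) : Int)).1,
           (bFold array dp1 dp2 ((2 + k : Nat) : Int)).2.1,
           (bFold array dp1 dp2 ((2 + k : Nat) : Int)).2.2.1,
           (bFold array dp1 dp2 ((2 + k : Nat) : Int)).2.2.2) := rfl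
    have h1 : 2 + k < (bFold array dp1 dp2 ((2 + k : Nat) : Int)).1.length := by omega
    have h2 : 2 + k < (bFold array dp1 dp2 ((2 + k : Nat) : Int)).2.1.length := by omega
    have hNlt : ((2 + k : Nat) : Int) < PySem.List.len array := by
      rw [PySem.List.len_eq]
      push_cast
      omega
    rw [hsplitA, hsplitB, hA', hB']
    rw [innerA_eq array (PySem.List.len array) k _ _ hNlt h1 h2]
    rw [stepB_eq array (PySem.List.len array) k _ _ _ _ h1 h2 hM1 hM2]
    have htk1 : ∀ (v : Int),
        (((bFold array dp1 dp2 ((2 + k : Nat) : Int)).1.set (2 + k) v).take (k + 1))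
          = (bFold array dp1 dp2 ((2 + k : Nat) : Int)).1.take (k + 1) :=
      fun v => List.take_set_of_le (by omega)
    have htk2 : ∀ (v : Int),
        (((bFold array dp1 dp2 ((2 + k : Nat) : Int)).2.1.set (2 + k) v).take (k + 1))
          = (bFold array dp1 dp2 ((2 + k : Nat) : Int)).2.1.take (k + 1) :=
      fun v => List.take_set_of_le (by omega)
    refine ⟨rfl, rfl, ?_, ?_, ?_, ?_⟩ <;> dsimp only
    · split
      · rw [List.length_set]; exact hL1
      · exact hL1
    · split
      · rw [List.length_set]; exact hL2
      · exact hL2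
    · rw [if_neg (show ¬ k + 1 = 0 by omega)]
      split
      · rw [htk1]
      · rfl
    · by_cases hk0 : k = 0
      · subst hk0
        simp
      · rw [if_neg hk0, if_neg (show ¬ k + 1 ≤ 1 by omega)]
        split
        · rw [htk2]
        · rfl

-- ===== VERDICT (by name: the statement is the Claim_ definition above) =====
theorem maxSum2_spec : Claim_equal_maxSum2 := by
  unfold Claim_equal_maxSum2
  intro array dp1 dp2 _ hpre
  obtain ⟨hne1, hne2, hlen⟩ := hpre
  unfold Spec_maxSum2
  have hAdef : maxSum2 array dp1 dp2
      = max ((PySem.List.max? (aFold array dp1 dp2 (PySem.List.len array)).1 (fun x => x)).getD 0)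
            ((PySem.List.max? (aFold array dp1 dp2 (PySem.List.len array)).2 (fun x => x)).getD 0) := rfl
  have hBdef : maxSum2_alt array dp1 dp2
      = max ((PySem.List.max? (bFold array dp1 dp2 (PySem.List.len array)).1 (fun x => x)).getD 0)
            ((PySem.List.max? (bFold array dp1 dp2 (PySem.List.len array)).2.1 (fun x => x)).getD 0) := rfl
  rw [hAdef, hBdef]
  by_cases h3 : 3 ≤ array.length
  · obtain ⟨hd1, hd2⟩ := hlen h3
    have hcast : PySem.List.len array = ((2 + (array.length - 2) : Nat) : Int) := by
      rw [PySem.List.len_eq]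
      push_cast
      omega
    have := mainInv array dp1 dp2 hd1 hd2 (array.length - 2) (by omega)
    rw [hcast, this.1, this.2.1]
  · have hnil : PySem.List.pyRange 2 (PySem.List.len array) 1 = [] := by
      apply PySem.List.pyRange_one_eq_nil
      rw [PySem.List.len_eq]
      omega
    unfold aFold bFold
    rw [hnil]
    simp
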